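-- pv_equiv track=rewrite | github.com/krykieron/Kurs-Python---CODE-ME | 05_funkcje_cd/04_love_calc.py | oblicz_dopasowanie
-- ===== SOURCE A (Python) =====
-- def oblicz_dopasowanie(imie1, imie2):
--     litery = {}
--     for litera in imie1 + imie2 + "LOVE":
--         litery[litera] = litery.get(litera, 0) + 1
--
--     suma_wystapien = sum(litery.values())
--     while suma_wystapien > 99:
--         suma_wystapien = sum(int(cyfra) for cyfra in str(suma_wystapien))
--
--     return suma_wystapien
-- ===== SOURCE B (Python) =====
-- def oblicz_dopasowanie(imie1, imie2):
--     # the letter-count dict sums to len(imie1) + len(imie2) + 4 ("LOVE"), no dict needed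
--     n = len(imie1) + len(imie2) + 4
--     while n > 99:
--         s = 0
--         m = n
--         while m > 0:
--             s += m % 10
--             m //= 10
--         n = s
--     return n
-- ===== Notes on version B (the rewrite author's own statement) =====
-- stated objective: faster
-- what changed: B replaces the per-character dict-counting pass and sum(values) by the closed form len(imie1)+len(imie2)+4 and reduces digits with integer arithmetic (% and //) instead of building str(n); the letter dict disappears entirely.
import Mathlib
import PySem

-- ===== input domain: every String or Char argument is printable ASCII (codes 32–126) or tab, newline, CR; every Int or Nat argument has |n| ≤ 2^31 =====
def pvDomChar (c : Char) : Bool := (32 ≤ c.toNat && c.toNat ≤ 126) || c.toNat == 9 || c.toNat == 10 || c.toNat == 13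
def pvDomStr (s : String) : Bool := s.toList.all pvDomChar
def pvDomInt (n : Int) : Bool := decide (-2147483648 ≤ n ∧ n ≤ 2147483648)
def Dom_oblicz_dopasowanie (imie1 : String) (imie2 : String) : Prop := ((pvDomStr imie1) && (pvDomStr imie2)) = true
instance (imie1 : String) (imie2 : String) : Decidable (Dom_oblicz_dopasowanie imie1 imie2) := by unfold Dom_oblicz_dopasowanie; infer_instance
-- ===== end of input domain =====

-- B replaces A's per-character dict-counting pass + sum(values) by the closed form
-- len(imie1)+len(imie2)+4 and reduces the digits arithmetically (% and //) instead of via str(n).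

-- proof-side decimal digit sum, used only by the termination arguments of both ports' loops
def pvNatDS (m : Nat) : Nat := if m = 0 then 0 else m % 10 + pvNatDS (m / 10)

theorem pvNatDS_le (m : Nat) : pvNatDS m ≤ m := by
  induction m using Nat.strong_induction_on with
  | _ m ih =>
    rw [pvNatDS]
    split
    · omega
    · have h := ih (m / 10) (by omega)
      omega

theorem pvNatDS_lt (m : Nat) (h10 : 10 ≤ m) : pvNatDS m < m := by
  rw [pvNatDS]
  have h := pvNatDS_le (m / 10)
  split <;> omega

-- ===== PORT A =====
-- int(cyfra) for a one-character string; exact for the digit characters str(n) produces here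
def pvDigVal (c : Char) : Int := (PySem.Int.ofChars? [c]).getD 0

-- sum(int(cyfra) for cyfra in str(n))
def pvStrDigitSum (n : Int) : Int := ((PySem.Int.toStr n).toList.map pvDigVal).sum

theorem pvDigVal_digitChar (d : Nat) (h : d < 10) : pvDigVal (Nat.digitChar d) = (d : Int) := by
  interval_cases d <;> decide

theorem pvSum_toDigits (m : Nat) :
    ((Nat.toDigits 10 m).map pvDigVal).sum = (pvNatDS m : Int) := by
  induction m using Nat.strong_induction_on with
  | _ m ih =>
    have hz : pvNatDS 0 = 0 := by rw [pvNatDS]; simp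
    by_cases h10 : m < 10
    · rw [Nat.toDigits_of_lt_base h10]
      have hds : pvNatDS m = m := by
        rw [pvNatDS]
        by_cases h0 : m = 0
        · simp [h0]
        · rw [if_neg h0, show m / 10 = 0 by omega, hz]; omega
      simp [pvDigVal_digitChar m h10, hds]
    · rw [Nat.toDigits_of_base_le (by norm_num) (by omega)]
      rw [List.map_append, List.sum_append]
      rw [ih (m / 10) (by omega)]
      simp [pvDigVal_digitChar (m % 10) (by omega)]
      conv_rhs => rw [pvNatDS]
      rw [if_neg (by omega : ¬ m = 0)]
      push_cast
      ring

theorem pvStrDigitSum_natCast (m : Nat) : pvStrDigitSum (m : Int) = (pvNatDS m : Int) := by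
  unfold pvStrDigitSum
  rw [PySem.Int.toList_toStr]
  unfold PySem.Int.toChars
  simp [show ¬ ((m : Int) < 0) from by omega, pvSum_toDigits]

-- while suma_wystapien > 99: suma_wystapien = sum(int(cyfra) for cyfra in str(suma_wystapien))
def pvRedA (n : Int) : Int :=
  if _h : 99 < n then pvRedA (pvStrDigitSum n) else n
termination_by n.toNat
decreasing_by
  have hn : ((n.toNat : Nat) : Int) = n := Int.toNat_of_nonneg (by omega)
  rw [← hn, pvStrDigitSum_natCast]
  have := pvNatDS_lt n.toNat (by omega)
  simp
  omega

def oblicz_dopasowanie (imie1 : String) (imie2 : String) : Int :=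
  let litery := (imie1.toList ++ imie2.toList ++ ['L', 'O', 'V', 'E']).foldl
      (fun d c => d.insert c (d.getD c 0 + 1)) PySem.Dict.empty
  let suma_wystapien := (PySem.Dict.values litery).sum
  pvRedA suma_wystapien

-- ===== PORT B =====
-- inner loop: while m > 0: s += m % 10; m //= 10
def pvDigitSumB (s : Int) (m : Int) : Int :=
  if _h : 0 < m then pvDigitSumB (s + PySem.Int.mod m 10) (PySem.Int.floordiv m 10) else s
termination_by m.toNat
decreasing_by
  rw [PySem.Int.floordiv_eq_ediv_of_pos (by norm_num)]
  omega

theorem pvDigitSumB_natCast (s : Int) (m : Nat) :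
    pvDigitSumB s (m : Int) = s + (pvNatDS m : Int) := by
  induction m using Nat.strong_induction_on generalizing s with
  | _ m ih =>
    rw [pvDigitSumB, pvNatDS]
    by_cases h0 : m = 0
    · simp [h0]
    · have hpos : (0 : Int) < (m : Int) := by omega
      rw [dif_pos hpos, if_neg h0,
        show (10 : Int) = ((10 : Nat) : Int) from by norm_num,
        PySem.Int.mod_natCast, PySem.Int.floordiv_natCast,
        ih (m / 10) (by omega)]
      push_cast
      ring

-- outer loop: while n > 99: n = digit sum of n
def pvRedB (n : Int) : Int :=
  if _h : 99 < n then pvRedB (pvDigitSumB 0 n) else n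
termination_by n.toNat
decreasing_by
  have hn : ((n.toNat : Nat) : Int) = n := Int.toNat_of_nonneg (by omega)
  rw [← hn, pvDigitSumB_natCast]
  have := pvNatDS_lt n.toNat (by omega)
  simp
  omega

def oblicz_dopasowanie_alt (imie1 : String) (imie2 : String) : Int :=
  pvRedB (PySem.Str.len imie1 + PySem.Str.len imie2 + 4)

-- ===== PRECONDITION & SPEC =====
def Spec_oblicz_dopasowanie (imie1 : String) (imie2 : String) (out : Int) : Prop := out = oblicz_dopasowanie_alt imie1 imie2
instance (imie1 : String) (imie2 : String) (out : Int) : Decidable (Spec_oblicz_dopasowanie imie1 imie2 out) := by unfold Spec_oblicz_dopasowanie; infer_instance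

-- ===== CLAIM (what is proved, stated in full; the proofs are below) =====
def Claim_equal_oblicz_dopasowanie : Prop := ∀ (imie1 : String) (imie2 : String), Dom_oblicz_dopasowanie imie1 imie2 → Spec_oblicz_dopasowanie imie1 imie2 (oblicz_dopasowanie imie1 imie2)

-- ===== LEMMAS AND PROOFS =====

-- A's letter-count dict sums its values to the length of the iterated character list
theorem pvValuesSum (cs : List Char) :
    (PySem.Dict.values
      (cs.foldl (fun d c => d.insert c (d.getD c 0 + 1)) PySem.Dict.empty)).sum
      = (cs.length : Int) := by
  rw [PySem.Dict.foldl_insert_getD_add_one_eq_counter]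
  have hvals : (PySem.Dict.counter cs).values
      = ((PySem.Dict.counter cs).items).map Prod.snd := rfl
  rw [hvals, PySem.Dict.items_counter, List.map_map]
  have hperm : (PySem.Set.ofList cs).Perm cs.dedup := by
    rw [List.perm_ext_iff_of_nodup (PySem.Set.nodup_ofList cs) cs.nodup_dedup]
    intro a
    simp [PySem.Set.mem_ofList]
  rw [(hperm.map _).sum_eq]
  rw [show (Prod.snd ∘ fun k => (k, (List.count k cs : Int))) = fun k => ((List.count k cs : Nat) : Int) from rfl]
  rw [← List.sum_map_count_dedup_eq_length cs, Nat.cast_list_sum, List.map_map]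
  rfl

theorem pvRed_eq_aux (k : Nat) : ∀ n : Int, 0 ≤ n → n.toNat ≤ k → pvRedA n = pvRedB n := by
  induction k with
  | zero =>
    intro n h0 hk
    rw [pvRedA, pvRedB]
    have : ¬ 99 < n := by omega
    simp [this]
  | succ k ih =>
    intro n h0 hk
    rw [pvRedA, pvRedB]
    by_cases h : 99 < n
    · rw [dif_pos h, dif_pos h]
      have hn : ((n.toNat : Nat) : Int) = n := Int.toNat_of_nonneg h0
      rw [← hn, pvStrDigitSum_natCast, pvDigitSumB_natCast, zero_add]
      exact ih _ (by omega) (by have := pvNatDS_lt n.toNat (by omega); omega)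
    · simp [h]

theorem pvRed_eq (n : Int) (h0 : 0 ≤ n) : pvRedA n = pvRedB n :=
  pvRed_eq_aux n.toNat n h0 le_rfl

-- ===== VERDICT (by name: the statement is the Claim_ definition above) =====
theorem oblicz_dopasowanie_spec : Claim_equal_oblicz_dopasowanie := by
  intro imie1 imie2 _
  unfold Spec_oblicz_dopasowanie oblicz_dopasowanie oblicz_dopasowanie_alt
  dsimp only
  rw [pvValuesSum]
  rw [pvRed_eq _ (by positivity)]
  congr 1
  rw [PySem.Str.len_eq, PySem.Str.len_eq]
  simp
  ring
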